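-- pv_equiv track=rewrite | github.com/WalaceLuna/TrabalhoDaFacultade | str9.py | segmentos_consecutivos
-- ===== SOURCE A (Python) =====
-- def segmentos_consecutivos(frase):
--     elemento  =  frase[0]
--     contador = 1
--     for k in frase:
--         if  elemento!=k:
--             contador = contador+1
--             elemento = k
--     return   contador
-- ===== SOURCE B (Python) =====
-- def segmentos_consecutivos(frase):
--     # Run-skipping: the outer loop advances one maximal run per iteration
--     # (inner scan skips all characters equal to the run's first character).
--     count = 0
--     i = 0
--     n = len(frase)
--     while i < n:
--         count += 1
--         first = frase[i]
--         j = i + 1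
--         while j < n and frase[j] == first:
--             j += 1
--         i = j
--     return count
-- ===== Notes on version B (the rewrite author's own statement) =====
-- stated objective: alternative
-- what changed: B counts maximal runs by a run-skipping two-pointer loop (the outer loop advances one whole run per iteration, an inner scan skips the equal characters), instead of A's single element-wise pass maintaining a last-seen element and incrementing on each change.
-- crash fix: On the empty string A raises IndexError (frase[0]); B returns 0. — e.g. on segmentos_consecutivos(""): A raises IndexError, B returns 0
import Mathlib
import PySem

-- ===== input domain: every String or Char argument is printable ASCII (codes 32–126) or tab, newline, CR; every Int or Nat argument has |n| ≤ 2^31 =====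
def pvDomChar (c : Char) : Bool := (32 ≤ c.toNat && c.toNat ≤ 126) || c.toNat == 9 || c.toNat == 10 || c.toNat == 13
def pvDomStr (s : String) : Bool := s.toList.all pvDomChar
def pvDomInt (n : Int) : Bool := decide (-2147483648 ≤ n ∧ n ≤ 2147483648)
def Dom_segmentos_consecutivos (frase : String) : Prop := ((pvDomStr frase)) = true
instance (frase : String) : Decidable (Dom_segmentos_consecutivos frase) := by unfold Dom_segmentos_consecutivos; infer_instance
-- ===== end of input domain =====

-- B counts maximal runs with a run-skipping outer loop (one run per iteration) instead of
-- A's element-wise pass with a last-seen element; same O(n) cost (objective: alternative).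

-- ===== PORT A =====
-- elemento = frase[0]; contador = 1; for k in frase: if elemento != k: contador += 1; elemento = k
def segmentos_consecutivos (frase : String) : Int :=
  match PySem.Str.pyGet? frase 0 with
  | none => 0  -- IndexError on "", excluded by Pre_
  | some e0 =>
    (frase.toList.foldl
      (fun (s : Char × Int) k => if s.1 != k then (k, s.2 + 1) else s)
      (e0, 1)).2

-- ===== PORT B =====
-- outer while: count += 1, then the inner while skips the characters equal to the
-- run's first character; ported as recursion on the remaining suffix, the inner
-- while being dropWhile (one outer iteration = one recursive call).
-- fuel (= the remaining length, enough for the while loop) only makes the recursion structural.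
def pvAltLoop : Nat → List Char → Int → Int
  | 0, _, count => count
  | _ + 1, [], count => count
  | n + 1, h :: t, count => pvAltLoop n (t.dropWhile (· == h)) (count + 1)

def segmentos_consecutivos_alt (frase : String) : Int :=
  pvAltLoop frase.toList.length frase.toList 0

-- ===== PRECONDITION & SPEC =====
-- Pre_ excludes only the empty string, on which A raises IndexError (frase[0]).
def Pre_segmentos_consecutivos (frase : String) : Prop := frase ≠ ""
instance (frase : String) : Decidable (Pre_segmentos_consecutivos frase) := by unfold Pre_segmentos_consecutivos; infer_instance
def pvWitness_segmentos_consecutivos : String := "aab"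
-- On the empty string A raises IndexError (frase[0] on an empty sequence); B returns 0.
def Raises_segmentos_consecutivos (frase : String) : Prop := frase = ""
instance (frase : String) : Decidable (Raises_segmentos_consecutivos frase) := by unfold Raises_segmentos_consecutivos; infer_instance
def pvRaiseWitness_segmentos_consecutivos : String := ""
def pvRaiseWitnessOut_segmentos_consecutivos : Int := 0
def Spec_segmentos_consecutivos (frase : String) (out : Int) : Prop := out = segmentos_consecutivos_alt frase
instance (frase : String) (out : Int) : Decidable (Spec_segmentos_consecutivos frase out) := by unfold Spec_segmentos_consecutivos; infer_instance

-- ===== CLAIM =====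
def Claim_equal_segmentos_consecutivos : Prop := ∀ (frase : String), Dom_segmentos_consecutivos frase → Pre_segmentos_consecutivos frase → Spec_segmentos_consecutivos frase (segmentos_consecutivos frase)
def Claim_raises_segmentos_consecutivos : Prop := (∀ (frase : String), Dom_segmentos_consecutivos frase → Raises_segmentos_consecutivos frase → ¬ Pre_segmentos_consecutivos frase) ∧ (Dom_segmentos_consecutivos (pvRaiseWitness_segmentos_consecutivos) ∧ Raises_segmentos_consecutivos (pvRaiseWitness_segmentos_consecutivos) ∧ segmentos_consecutivos_alt (pvRaiseWitness_segmentos_consecutivos) = pvRaiseWitnessOut_segmentos_consecutivos)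

-- ===== LEMMAS AND PROOFS =====
-- Number of adjacent differing pairs, the common yardstick for both proofs.
def pvCountDiff : List Char → Int
  | [] => 0
  | [_] => 0
  | a :: b :: t => (if a = b then 0 else 1) + pvCountDiff (b :: t)

-- A's loop starting at state (e, c) ends at c + pvCountDiff (e :: t).
theorem loopA_eq (t : List Char) (e : Char) (c : Int) :
    (t.foldl (fun (s : Char × Int) k => if s.1 != k then (k, s.2 + 1) else s) (e, c)).2
      = c + pvCountDiff (e :: t) := by
  induction t generalizing e c with
  | nil => simp [pvCountDiff]
  | cons k rest ih =>
    simp only [List.foldl_cons]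
    by_cases h : e = k
    · subst h
      rw [if_neg (by simp)]
      rw [ih]
      simp [pvCountDiff]
    · rw [if_pos (by simpa using h)]
      rw [ih]
      simp only [pvCountDiff]
      rw [if_neg h]
      ring

theorem pvAltLoop_nil (f : Nat) (c : Int) : pvAltLoop f [] c = c := by
  cases f <;> rfl

-- any fuel at least the length of the list gives the same result
theorem pvAltLoop_mono (n : Nat) : ∀ (m : Nat) (l : List Char) (c : Int),
    l.length ≤ n → l.length ≤ m → pvAltLoop n l c = pvAltLoop m l c := by
  induction n with
  | zero =>
    intro m l c h1 _
    have : l = [] := List.eq_nil_of_length_eq_zero (Nat.le_zero.mp h1)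
    subst this
    simp [pvAltLoop_nil, pvAltLoop]
  | succ n ih =>
    intro m l c h1 h2
    cases l with
    | nil => simp [pvAltLoop_nil]
    | cons h t =>
      cases m with
      | zero => simp at h2
      | succ m =>
        show pvAltLoop n (t.dropWhile (· == h)) (c + 1)
          = pvAltLoop m (t.dropWhile (· == h)) (c + 1)
        exact ih m _ _
          (le_trans (List.length_dropWhile_le _ _) (Nat.le_of_succ_le_succ h1))
          (le_trans (List.length_dropWhile_le _ _) (Nat.le_of_succ_le_succ h2))

-- B's run-skipping loop on a nonempty suffix ends at c + 1 + pvCountDiff (h :: t).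
theorem loopB_eq (n : Nat) : ∀ (t : List Char) (h : Char) (c : Int), t.length ≤ n →
    pvAltLoop (n + 1) (h :: t) c = c + 1 + pvCountDiff (h :: t) := by
  induction n with
  | zero =>
    intro t h c hlen
    have ht : t = [] := List.eq_nil_of_length_eq_zero (Nat.le_zero.mp hlen)
    subst ht
    simp [pvAltLoop, pvCountDiff]
  | succ n ih =>
    intro t h c hlen
    cases t with
    | nil => simp [pvAltLoop, pvAltLoop_nil, pvCountDiff]
    | cons k r =>
      have hr : r.length ≤ n := Nat.le_of_succ_le_succ (by simpa using hlen)
      by_cases hk : k = h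
      · subst hk
        have hdropstep : pvAltLoop (n + 1 + 1) (k :: k :: r) c
            = pvAltLoop (n + 1) (r.dropWhile (· == k)) (c + 1) := by
          simp [pvAltLoop]
        rw [hdropstep,
          ← pvAltLoop_mono n (n + 1) (r.dropWhile (· == k)) (c + 1)
            (le_trans (List.length_dropWhile_le _ _) hr)
            (le_trans (List.length_dropWhile_le _ _) (Nat.le_succ_of_le hr))]
        have hunf : pvAltLoop (n + 1) (k :: r) c
            = pvAltLoop n (r.dropWhile (· == k)) (c + 1) := rfl
        rw [← hunf, ih r k c hr]
        simp [pvCountDiff]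
      · have hbe : (k == h) = false := by simp [hk]
        have hstep : pvAltLoop (n + 1 + 1) (h :: k :: r) c
            = pvAltLoop (n + 1) (k :: r) (c + 1) := by
          simp [pvAltLoop, hbe]
        rw [hstep, ih r k (c + 1) hr]
        simp only [pvCountDiff]
        rw [if_neg (fun he => hk he.symm)]
        ring

theorem segmentos_consecutivos_eq (frase : String) (h : frase ≠ "") :
    segmentos_consecutivos frase = segmentos_consecutivos_alt frase := by
  have hl : frase.toList ≠ [] := by
    simpa [← String.toList_eq_nil_iff] using h
  obtain ⟨hd, tl, hcons⟩ := List.exists_cons_of_ne_nil hl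
  have hget : PySem.Str.pyGet? frase 0 = some hd := by
    have := PySem.Str.pyGet?_natCast frase 0
    simp only [Int.natCast_zero] at this
    rw [this, hcons]; rfl
  unfold segmentos_consecutivos segmentos_consecutivos_alt
  rw [hget, hcons]
  simp only [List.foldl_cons, bne_self_eq_false, if_neg Bool.false_ne_true,
    List.length_cons]
  rw [loopA_eq, loopB_eq tl.length tl hd 0 le_rfl]
  ring

-- ===== VERDICT =====
theorem segmentos_consecutivos_spec : Claim_equal_segmentos_consecutivos := by
  intro frase _ hpre
  exact segmentos_consecutivos_eq frase hpre

def segmentos_consecutivos_raises : Claim_raises_segmentos_consecutivos := by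
  unfold Claim_raises_segmentos_consecutivos
  exact ⟨fun _ _ h => by simp [Raises_segmentos_consecutivos] at h; simp [Pre_segmentos_consecutivos, h], by decide⟩
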